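-- pv_equiv track=rewrite | github.com/ratati12/seti | Курсовая работа Матяша А.А. ККСО-01-19/src/nrz.py | get_encoded_sequence
-- ===== SOURCE A (Python) =====
-- def get_encoded_sequence(sequence):
--     if sequence == None:
--         raise Exception("Your sequence is None!")
--     if len(sequence) == 0:
--         raise Exception("The size of your sequence is zero!")
--
--     encoded_sequence = []
--     for i in range (len(sequence)):
--         if sequence[i] != 0 and sequence[i] != 1:
--             raise Exception("Incorrect data format!")
--
--         if sequence[i] == 1:
--             encoded_sequence.append(1)
--         else:
--             encoded_sequence.append(0)
--
--     return encoded_sequence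
-- ===== SOURCE B (Python) =====
-- def get_encoded_sequence(sequence):
--     if sequence == None:
--         raise Exception("Your sequence is None!")
--     if len(sequence) == 0:
--         raise Exception("The size of your sequence is zero!")
--
--     table = {0: 0, 1: 1}
--
--     def go(seq):
--         if not seq:
--             return []
--         head = seq[0]
--         if head not in table:
--             raise Exception("Incorrect data format!")
--         return [table[head]] + go(seq[1:])
--
--     return go(sequence)
-- ===== Notes on version B (the rewrite author's own statement) =====
-- stated objective: alternative
-- what changed: B replaces A's index loop with interleaved comparisons and appends by a recursive head/tail decomposition driven by a {0:0, 1:1} lookup table: membership in the table is the validity test and the table value is the encoded bit, built back-to-front by list concatenation.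
import Mathlib
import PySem

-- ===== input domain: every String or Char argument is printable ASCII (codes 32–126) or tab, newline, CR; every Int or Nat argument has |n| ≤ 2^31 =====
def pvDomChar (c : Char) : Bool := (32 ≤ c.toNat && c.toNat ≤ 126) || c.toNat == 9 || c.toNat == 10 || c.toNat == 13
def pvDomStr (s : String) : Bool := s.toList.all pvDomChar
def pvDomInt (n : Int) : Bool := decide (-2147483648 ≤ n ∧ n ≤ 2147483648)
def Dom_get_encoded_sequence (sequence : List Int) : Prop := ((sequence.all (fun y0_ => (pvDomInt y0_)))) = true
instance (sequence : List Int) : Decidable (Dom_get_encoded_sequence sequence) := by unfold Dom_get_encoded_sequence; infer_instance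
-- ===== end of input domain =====

-- B replaces A's interleaved index loop by a recursive head/tail traversal driven
-- by a {0:0, 1:1} lookup table; return values proved equal on Pre_.

-- ===== PORT A =====
-- A's for-loop over range(len(sequence)), appending 1 or 0, raising on a bad
-- element (raise modeled as returning the junk value []; excluded by Pre_).
def pvA_loop (acc : List Int) : List Int → List Int
  | [] => acc
  | x :: xs =>
      if x ≠ 0 ∧ x ≠ 1 then []  -- raise Exception("Incorrect data format!")
      else if x = 1 then pvA_loop (acc ++ [1]) xs
      else pvA_loop (acc ++ [0]) xs

def get_encoded_sequence (sequence : List Int) : List Int :=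
  if sequence.length = 0 then []  -- raise; excluded by Pre_
  else pvA_loop [] sequence

-- ===== PORT B =====
-- B's lookup table {0: 0, 1: 1}
def pvB_table : PySem.Dict Int Int := PySem.Dict.ofList [(0, 0), (1, 1)]

-- B's recursive helper go: table membership as the validity test, table value
-- as the encoded bit, result built by concatenation (raise modeled as []).
def pvB_go : List Int → List Int
  | [] => []
  | x :: rest =>
      match pvB_table.get? x with
      | none => []  -- raise Exception("Incorrect data format!"); excluded by Pre_
      | some v => [v] ++ pvB_go rest

def get_encoded_sequence_alt (sequence : List Int) : List Int :=
  if sequence.length = 0 then []  -- raise; excluded by Pre_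
  else pvB_go sequence

-- ===== PRECONDITION & SPEC =====
-- A raises on the empty list and whenever some element is neither 0 nor 1;
-- Pre_ is exactly the inputs on which A returns normally.
def Pre_get_encoded_sequence (sequence : List Int) : Prop :=
  sequence ≠ [] ∧ ∀ x ∈ sequence, x = 0 ∨ x = 1
instance (sequence : List Int) : Decidable (Pre_get_encoded_sequence sequence) := by
  unfold Pre_get_encoded_sequence; infer_instance

def pvWitness_get_encoded_sequence : List Int := [0, 1, 1, 0]

def Spec_get_encoded_sequence (sequence : List Int) (out : List Int) : Prop := out = get_encoded_sequence_alt sequence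
instance (sequence : List Int) (out : List Int) : Decidable (Spec_get_encoded_sequence sequence out) := by unfold Spec_get_encoded_sequence; infer_instance

-- ===== CLAIM =====
def Claim_equal_get_encoded_sequence : Prop := ∀ (sequence : List Int), Dom_get_encoded_sequence sequence → Pre_get_encoded_sequence sequence → Spec_get_encoded_sequence sequence (get_encoded_sequence sequence)

-- ===== LEMMAS AND PROOFS =====
lemma pvA_loop_eq (acc : List Int) (xs : List Int)
    (h : ∀ x ∈ xs, x = 0 ∨ x = 1) :
    pvA_loop acc xs = acc ++ xs.map (fun x => if x = 1 then 1 else 0) := by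
  induction xs generalizing acc with
  | nil => simp [pvA_loop]
  | cons x xs ih =>
    have hx := h x (List.mem_cons_self ..)
    have hrest : ∀ y ∈ xs, y = 0 ∨ y = 1 := fun y hy => h y (List.mem_cons_of_mem _ hy)
    rcases hx with h0 | h1
    · subst h0; simp [pvA_loop, ih _ hrest]
    · subst h1; simp [pvA_loop, ih _ hrest]

lemma pvB_go_eq (xs : List Int) (h : ∀ x ∈ xs, x = 0 ∨ x = 1) :
    pvB_go xs = xs.map (fun x => if x = 1 then 1 else 0) := by
  induction xs with
  | nil => simp [pvB_go]
  | cons x xs ih =>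
    have hx := h x (List.mem_cons_self ..)
    have hrest : ∀ y ∈ xs, y = 0 ∨ y = 1 := fun y hy => h y (List.mem_cons_of_mem _ hy)
    rcases hx with h0 | h1
    · subst h0; simp [pvB_go, pvB_table, ih hrest]; rfl
    · subst h1; simp [pvB_go, pvB_table, ih hrest]; rfl

-- ===== VERDICT =====
theorem get_encoded_sequence_spec : Claim_equal_get_encoded_sequence := by
  intro sequence _ hpre
  obtain ⟨hne, hall⟩ := hpre
  unfold Spec_get_encoded_sequence get_encoded_sequence get_encoded_sequence_alt
  have hlen : sequence.length ≠ 0 := by simpa using hne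
  rw [if_neg hlen, if_neg hlen, pvA_loop_eq [] sequence hall, pvB_go_eq sequence hall]
  simp
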